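-- pv_equiv track=rewrite | github.com/mayankmahajan/html5auto | classes/Components/FPVComponentClass.py | getSelectionColor
-- ===== SOURCE A (Python) =====
-- def getSelectionColor(colors,coloredPaths):
--     temp = [el for el in sorted(coloredPaths) if "#" in el]
--     f = 0
--     for color in colors:
--         for el in temp:
--             if color in el:
--                 f = f + 1
--         if f == 1:
--             return color
--         f = 0
-- ===== SOURCE B (Python) =====
-- def getSelectionColor(colors, coloredPaths):
--     temp = [el for el in sorted(coloredPaths) if "#" in el]
--     keys = list(dict.fromkeys(colors))
--     once, more = set(), set()
--     for path in temp:
--         for c in keys: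
--             if c in path:
--                 if c in once:
--                     once.discard(c)
--                     more.add(c)
--                 elif c not in more:
--                     once.add(c)
--     for c in colors:
--         if c in once:
--             return c
--     return None
-- ===== Notes on version B (the rewrite author's own statement) =====
-- stated objective: alternative
-- what changed: Replaces A's per-color rescans of the path list (a full count restarted for every color) by a once/more two-set automaton: one sweep over the '#'-paths moves each color between the sets 'seen once' and 'seen more than once', and the answer is the first color still in the 'once' set; no counter is ever kept.
import Mathlib
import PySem

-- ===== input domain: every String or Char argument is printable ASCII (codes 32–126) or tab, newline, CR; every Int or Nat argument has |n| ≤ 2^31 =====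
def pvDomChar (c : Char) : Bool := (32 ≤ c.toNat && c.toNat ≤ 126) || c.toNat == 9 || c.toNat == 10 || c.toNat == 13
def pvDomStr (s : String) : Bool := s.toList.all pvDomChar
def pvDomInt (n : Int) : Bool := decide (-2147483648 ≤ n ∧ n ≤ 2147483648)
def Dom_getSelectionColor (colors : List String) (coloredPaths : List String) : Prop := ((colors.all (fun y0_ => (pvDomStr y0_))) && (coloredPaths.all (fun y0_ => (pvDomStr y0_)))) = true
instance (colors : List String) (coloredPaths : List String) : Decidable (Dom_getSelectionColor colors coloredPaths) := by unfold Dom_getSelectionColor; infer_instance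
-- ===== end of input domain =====

-- B replaces A's per-color counting rescans by a two-set automaton ('once'/'more') updated in a single
-- sweep over the '#'-paths, then returns the first color in 'once' (alternative decomposition, same result).

-- ===== PORT A =====
-- the 'for color in colors' loop with its inner counting loop, early return, f reset
def pvGoA : List String → List String → Option String
  | [], _ => none
  | color :: rest, temp =>
      let f : Int := temp.foldl (fun f el => if PySem.Str.isIn color el then f + 1 else f) 0
      if f = 1 then some color else pvGoA rest temp

def getSelectionColor (colors : List String) (coloredPaths : List String) : Option String :=
  let temp := (PySem.List.sorted coloredPaths (fun x => x) false).filter (fun el => PySem.Str.isIn "#" el)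
  pvGoA colors temp

-- ===== PORT B =====
-- 'for c in keys: if c in path: …' — the once/more set update of one path
def pvStepB (keys : List String) (st : PySem.Set String × PySem.Set String) (path : String) :
    PySem.Set String × PySem.Set String :=
  keys.foldl (fun st c =>
    if PySem.Str.isIn c path then
      if PySem.Set.contains st.1 c then (PySem.Set.discard st.1 c, PySem.Set.add st.2 c)
      else if PySem.Set.contains st.2 c then st
      else (PySem.Set.add st.1 c, st.2)
    else st) st

-- 'for c in colors: if c in once: return c'
def pvGoB : List String → PySem.Set String → Option String
  | [], _ => none
  | c :: rest, once => if PySem.Set.contains once c then some c else pvGoB rest once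

def getSelectionColor_alt (colors : List String) (coloredPaths : List String) : Option String :=
  let temp := (PySem.List.sorted coloredPaths (fun x => x) false).filter (fun el => PySem.Str.isIn "#" el)
  let keys := PySem.List.dedup colors                     -- list(dict.fromkeys(colors))
  let st := temp.foldl (pvStepB keys) (PySem.Set.empty, PySem.Set.empty)
  pvGoB colors st.1

-- ===== PRECONDITION & SPEC =====
def Spec_getSelectionColor (colors : List String) (coloredPaths : List String) (out : Option String) : Prop := out = getSelectionColor_alt colors coloredPaths
instance (colors : List String) (coloredPaths : List String) (out : Option String) : Decidable (Spec_getSelectionColor colors coloredPaths out) := by unfold Spec_getSelectionColor; infer_instance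

-- ===== CLAIM (what is proved, stated in full; the proofs are below) =====
def Claim_equal_getSelectionColor : Prop := ∀ (colors : List String) (coloredPaths : List String), Dom_getSelectionColor colors coloredPaths → Spec_getSelectionColor colors coloredPaths (getSelectionColor colors coloredPaths)

-- ===== LEMMAS AND PROOFS =====

-- ===== VERDICT (by name: the statement is the Claim_ definition above) =====
-- one pvStepB on the membership of a fixed color c: automaton transition (¬o∧¬m, o∨m) if c is a key
-- contained in the path, identity otherwise
theorem pv_step_mem (keys : List String) (hnd : keys.Nodup)
    (st : PySem.Set String × PySem.Set String) (path : String) (c : String) :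
    ((c ∈ (pvStepB keys st path).1 ↔
        (if c ∈ keys ∧ PySem.Str.isIn c path = true then (c ∉ st.1 ∧ c ∉ st.2) else c ∈ st.1)) ∧
     (c ∈ (pvStepB keys st path).2 ↔
        (if c ∈ keys ∧ PySem.Str.isIn c path = true then (c ∈ st.1 ∨ c ∈ st.2) else c ∈ st.2))) := by
  induction keys generalizing st with
  | nil => exact ⟨by simp [pvStepB], by simp [pvStepB]⟩
  | cons k ks ih =>
      simp only [List.nodup_cons] at hnd
      have ihk := ih hnd.2
      simp only [pvStepB, List.foldl_cons] at ihk ⊢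
      -- membership of c in the one k-iteration
      have hstep : ∀ st' : PySem.Set String × PySem.Set String,
          (c ∈ ((if PySem.Str.isIn k path then
              if PySem.Set.contains st'.1 k then (PySem.Set.discard st'.1 k, PySem.Set.add st'.2 k)
              else if PySem.Set.contains st'.2 k then st'
              else (PySem.Set.add st'.1 k, st'.2)
            else st') : PySem.Set String × PySem.Set String).1 ↔
            (if c = k ∧ PySem.Str.isIn k path = true then (c ∉ st'.1 ∧ c ∉ st'.2) else c ∈ st'.1)) ∧
          (c ∈ ((if PySem.Str.isIn k path then
              if PySem.Set.contains st'.1 k then (PySem.Set.discard st'.1 k, PySem.Set.add st'.2 k)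
              else if PySem.Set.contains st'.2 k then st'
              else (PySem.Set.add st'.1 k, st'.2)
            else st') : PySem.Set String × PySem.Set String).2 ↔
            (if c = k ∧ PySem.Str.isIn k path = true then (c ∈ st'.1 ∨ c ∈ st'.2) else c ∈ st'.2)) := by
        intro st'
        constructor <;>
          (split_ifs with hA hB hC <;>
           (try simp only [PySem.Set.contains_iff] at *) <;>
           (try simp only [PySem.Set.mem_add, PySem.Set.mem_discard]) <;>
           (first
             | tauto
             | (simp_all)))
      rcases hstep st with ⟨hs1, hs2⟩
      by_cases hck : c = k
      · subst hck
        have hnc : c ∉ ks := hnd.1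
        rw [(ihk _).1, (ihk _).2]
        simp only [hnc, false_and, if_false]
        rw [hs1, hs2]
        by_cases hin : PySem.Str.isIn c path = true <;> simp
      · simp only [hck, false_and, if_false] at hs1 hs2
        rw [(ihk _).1, (ihk _).2, hs1, hs2]
        simp [List.mem_cons, hck]

-- invariant of the path sweep: once = {keys with exactly one containing path}, more = {keys with >= 2}
theorem pv_fold_inv_gen (keys : List String) (hnd : keys.Nodup) (paths : List String) (c : String)
    (st : PySem.Set String × PySem.Set String) (n : Nat)
    (h1 : c ∈ st.1 ↔ (c ∈ keys ∧ n = 1)) (h2 : c ∈ st.2 ↔ (c ∈ keys ∧ 2 ≤ n)) :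
    (c ∈ (paths.foldl (pvStepB keys) st).1 ↔
       (c ∈ keys ∧ n + paths.countP (PySem.Str.isIn c) = 1)) ∧
    (c ∈ (paths.foldl (pvStepB keys) st).2 ↔
       (c ∈ keys ∧ 2 ≤ n + paths.countP (PySem.Str.isIn c))) := by
  induction paths generalizing st n with
  | nil => simp only [List.foldl_nil, List.countP_nil, Nat.add_zero]; exact ⟨h1, h2⟩
  | cons p ps ih =>
      simp only [List.foldl_cons, List.countP_cons]
      by_cases hk : c ∈ keys
      · by_cases hin : PySem.Str.isIn c p = true
        · have := ih (pvStepB keys st p) (n + 1)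
            (by rw [(pv_step_mem keys hnd st p c).1]
                simp only [hk, hin, and_self, if_true, h1, h2, true_and]
                omega)
            (by rw [(pv_step_mem keys hnd st p c).2]
                simp only [hk, hin, and_self, if_true, h1, h2, true_and]
                omega)
          refine ⟨this.1.trans ?_, this.2.trans ?_⟩ <;>
            (apply and_congr_right; intro _; simp only [hin, if_true]; omega)
        · have hin0 : PySem.Str.isIn c p = false := Bool.eq_false_iff.mpr (fun hh => hin hh)
          have := ih (pvStepB keys st p) n
            (by rw [(pv_step_mem keys hnd st p c).1]
                simp only [hin0, Bool.false_eq_true, and_false, if_false]; exact h1)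
            (by rw [(pv_step_mem keys hnd st p c).2]
                simp only [hin0, Bool.false_eq_true, and_false, if_false]; exact h2)
          refine ⟨this.1.trans ?_, this.2.trans ?_⟩ <;>
            (apply and_congr_right; intro _;
             simp only [hin0, Bool.false_eq_true, if_false, Nat.add_zero])
      · have hmem : ∀ (l : List String) (st' : PySem.Set String × PySem.Set String),
            (c ∈ st'.1 ↔ False) → (c ∈ st'.2 ↔ False) →
            (c ∈ (l.foldl (pvStepB keys) st').1 ↔ False) ∧
            (c ∈ (l.foldl (pvStepB keys) st').2 ↔ False) := by
          intro l
          induction l with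
          | nil => intro st' a b; exact ⟨a, b⟩
          | cons q qs ihq =>
              intro st' a b
              simp only [List.foldl_cons]
              exact ihq _ (by rw [(pv_step_mem keys hnd st' q c).1]
                              simp only [hk, false_and, if_false]; exact a)
                          (by rw [(pv_step_mem keys hnd st' q c).2]
                              simp only [hk, false_and, if_false]; exact b)
        have h := hmem (p :: ps) st
          (by rw [h1]; simp only [hk, false_and]) (by rw [h2]; simp only [hk, false_and])
        simp only [List.foldl_cons] at h
        exact ⟨h.1.trans (by simp [hk]), h.2.trans (by simp [hk])⟩

theorem pv_fold_inv (keys : List String) (hnd : keys.Nodup) (paths : List String) (c : String) :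
    (c ∈ (paths.foldl (pvStepB keys) (PySem.Set.empty, PySem.Set.empty)).1 ↔
       (c ∈ keys ∧ paths.countP (PySem.Str.isIn c) = 1)) ∧
    (c ∈ (paths.foldl (pvStepB keys) (PySem.Set.empty, PySem.Set.empty)).2 ↔
       (c ∈ keys ∧ 2 ≤ paths.countP (PySem.Str.isIn c))) := by
  have h := pv_fold_inv_gen keys hnd paths c (PySem.Set.empty, PySem.Set.empty) 0
    (by simp [PySem.Set.empty]) (by simp [PySem.Set.empty])
  simpa using h

-- A's color loop and B's color loop agree when once holds exactly the count-1 colors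
theorem pv_go_eq (colors' temp : List String) (once : PySem.Set String)
    (h : ∀ c ∈ colors', (c ∈ once ↔ temp.countP (PySem.Str.isIn c) = 1)) :
    pvGoA colors' temp = pvGoB colors' once := by
  induction colors' with
  | nil => rfl
  | cons c rest ih =>
      simp only [pvGoA, pvGoB, PySem.List.foldl_if_add_one, PySem.Set.contains_iff]
      have hc := h c (by simp)
      split_ifs with h1 h2 h2
      · rfl
      · exact absurd (hc.mpr (by omega)) h2
      · exact absurd (hc.mp h2) (by omega)
      · exact ih (fun x hx => h x (by simp [hx]))

theorem getSelectionColor_spec : Claim_equal_getSelectionColor := by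
  intro colors coloredPaths _
  unfold Spec_getSelectionColor getSelectionColor getSelectionColor_alt
  apply pv_go_eq
  intro c hc
  rw [(pv_fold_inv (PySem.List.dedup colors) (PySem.List.nodup_dedup colors) _ c).1,
      PySem.List.mem_dedup]
  simp [hc]
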